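-- pv_equiv track=rewrite | github.com/SoKenGo/2048-Game-UQ_CSSE7030_Assignment_3_2022 | a3_support.py | stack_left
-- ===== SOURCE A (Python) =====
-- from typing import Optional
--
-- NUM_COLS = NUM_ROWS = 4
--
-- NUM_COLS = NUM_ROWS = 4
--
-- def stack_left(tiles: list[list[Optional[int]]]) -> list[list[Optional[int]]]:
--     """ Moves all tiles as far as possible to the left without merging.
--
--     Parameters:
--         tiles: The tiles currently on the grid, where each internal list
--                represents a row in the grid.
--
--     Returns:
--         A copy of the tiles list, in which all the tiles have stacked to the left.
--     """
--     stacked_tiles = [[None for _ in range(NUM_COLS)] for _ in range(NUM_ROWS)]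
--     for i in range(NUM_ROWS):
--         to_fill = 0
--         for j in range(NUM_COLS):
--             if tiles[i][j] is not None:
--                 stacked_tiles[i][to_fill] = tiles[i][j]
--                 to_fill += 1
--     return stacked_tiles
-- ===== SOURCE B (Python) =====
-- from typing import Optional
--
-- NUM_COLS = NUM_ROWS = 4
--
-- def stack_left(tiles: list[list[Optional[int]]]) -> list[list[Optional[int]]]:
--     """Stack tiles left per row by a stable key-sort moving None to the end."""
--     return [sorted([tiles[i][j] for j in range(NUM_COLS)],
--                    key=lambda t: t is None)
--             for i in range(NUM_ROWS)]
-- ===== Notes on version B (the rewrite author's own statement) =====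
-- stated objective: idiomatic
-- what changed: Replaces the preallocated None matrix with index-tracked per-cell writes by a per-row comprehension that stably sorts each row's cells with key 't is None' (None to the end).
import Mathlib
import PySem

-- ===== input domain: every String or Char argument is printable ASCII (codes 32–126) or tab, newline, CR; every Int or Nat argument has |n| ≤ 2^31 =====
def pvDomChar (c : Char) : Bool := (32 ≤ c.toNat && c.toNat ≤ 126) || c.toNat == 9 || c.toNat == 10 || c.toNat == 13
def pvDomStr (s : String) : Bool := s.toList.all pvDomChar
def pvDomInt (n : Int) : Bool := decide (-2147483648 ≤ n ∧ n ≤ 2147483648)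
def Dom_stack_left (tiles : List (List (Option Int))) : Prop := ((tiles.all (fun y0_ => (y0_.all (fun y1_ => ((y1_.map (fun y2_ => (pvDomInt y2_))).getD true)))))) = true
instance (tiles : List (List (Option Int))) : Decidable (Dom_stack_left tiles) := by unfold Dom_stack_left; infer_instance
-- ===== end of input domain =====

-- B stacks each row by a stable key-sort (None last) instead of A's index-tracked writes
-- into a preallocated 4x4 None matrix; same values, more idiomatic.

-- ===== PORT A =====
-- Literal transliteration of A: build a 4x4 None matrix, then for i,j in range(4)
-- write tiles[i][j] at stacked[i][to_fill] when it is not None.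
def stack_left (tiles : List (List (Option Int))) : List (List (Option Int)) :=
  let stacked : List (List (Option Int)) :=
    (PySem.List.pyRange 0 4 1).map (fun _ =>
      (PySem.List.pyRange 0 4 1).map (fun _ => (none : Option Int)))
  (PySem.List.pyRange 0 4 1).foldl (fun st i =>
    ((PySem.List.pyRange 0 4 1).foldl (fun p j =>
        -- tiles[i][j]; in range on Pre_, the getD defaults are never used there
        match ((PySem.List.pyGet? tiles i).getD []) |> (fun row => (PySem.List.pyGet? row j).getD none) with
        | some v =>
            -- stacked_tiles[i][to_fill] = tiles[i][j]; to_fill += 1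
            (p.1.set i.toNat ((p.1.getD i.toNat []).set p.2 (some v)), p.2 + 1)
        | none => p) (st, 0)).1) stacked

-- ===== PORT B =====
-- Literal transliteration of Source B; the Python key 't is None' (a bool, False < True)
-- is ported as the Int key 0/1 with the same order.
def stack_left_alt (tiles : List (List (Option Int))) : List (List (Option Int)) :=
  (PySem.List.pyRange 0 4 1).map (fun i =>
    PySem.List.sorted
      ((PySem.List.pyRange 0 4 1).map (fun j =>
        (PySem.List.pyGet? ((PySem.List.pyGet? tiles i).getD []) j).getD none))
      (fun t => if t.isNone then (1 : Int) else 0) false)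

-- ===== PRECONDITION & SPEC =====
-- Pre_ excludes exactly the inputs on which the Python A raises IndexError:
-- fewer than 4 rows, or one of the first 4 rows shorter than 4 cells.
def Pre_stack_left (tiles : List (List (Option Int))) : Prop :=
  4 ≤ tiles.length ∧ ∀ r ∈ tiles.take 4, 4 ≤ r.length
instance (tiles : List (List (Option Int))) : Decidable (Pre_stack_left tiles) := by
  unfold Pre_stack_left; infer_instance
def pvWitness_stack_left : List (List (Option Int)) :=
  [[some 2, none, some 2, none], [none, none, none, some 4],
   [some 8, some 8, none, none], [none, some 16, some 2, some 2]]

def Spec_stack_left (tiles : List (List (Option Int))) (out : List (List (Option Int))) : Prop := out = stack_left_alt tiles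
instance (tiles : List (List (Option Int))) (out : List (List (Option Int))) : Decidable (Spec_stack_left tiles out) := by unfold Spec_stack_left; infer_instance

-- ===== CLAIM (what is proved, stated in full; the proofs are below) =====
def Claim_equal_stack_left : Prop := ∀ (tiles : List (List (Option Int))), Dom_stack_left tiles → Pre_stack_left tiles → Spec_stack_left tiles (stack_left tiles)

-- ===== LEMMAS AND PROOFS =====

-- The per-row accumulate pass of A, abstracted: fold over the column indices js,
-- writing non-None cells of r into row at position tf.
def rowFold (js : List Int) (r : List (Option Int)) (row : List (Option Int)) (tf : Nat) :
    List (Option Int) × Nat :=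
  js.foldl (fun p j =>
    match (PySem.List.pyGet? r j).getD none with
    | some v => (p.1.set p.2 (some v), p.2 + 1)
    | none => p) (row, tf)

def gRow (r : List (Option Int)) : List (Option Int) :=
  (rowFold (PySem.List.pyRange 0 4 1) r ((PySem.List.pyRange 0 4 1).map (fun _ => none)) 0).1


theorem tn2 : (2 : Int).toNat = 2 := rfl

theorem tn3 : (3 : Int).toNat = 3 := rfl

theorem pg1 {A : Type} (x0 x1 : A) (t : List A) : PySem.List.pyGet? (x0 :: x1 :: t) (1:Int) = some x1 := by simp

theorem pg2 {A : Type} (x0 x1 x2 : A) (t : List A) : PySem.List.pyGet? (x0 :: x1 :: x2 :: t) (2:Int) = some x2 := by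
  simpa using PySem.List.pyGet?_ofNat (x0 :: x1 :: x2 :: t) 2 (by simp)

theorem pg3 {A : Type} (x0 x1 x2 x3 : A) (t : List A) : PySem.List.pyGet? (x0 :: x1 :: x2 :: x3 :: t) (3:Int) = some x3 := by
  simpa using PySem.List.pyGet?_ofNat (x0 :: x1 :: x2 :: x3 :: t) 3 (by simp)

-- A's inner j-loop at a fixed row index i only touches component i of the matrix.
theorem inner_i0 (r0 : List (Option Int)) (rest : List (List (Option Int)))
    (js : List Int) (s0 s1 s2 s3 : List (Option Int)) (tf : Nat) :
    js.foldl (fun p j =>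
        match ((PySem.List.pyGet? (r0 :: rest) (0 : Int)).getD []) |> (fun row => (PySem.List.pyGet? row j).getD none) with
        | some v => (p.1.set (0 : Int).toNat ((p.1.getD (0 : Int).toNat []).set p.2 (some v)), p.2 + 1)
        | none => p) ([s0, s1, s2, s3], tf)
      = ([(rowFold js r0 s0 tf).1, s1, s2, s3], (rowFold js r0 s0 tf).2) := by
  induction js generalizing s0 tf with
  | nil => simp [rowFold]
  | cons j js ih =>
      simp only [List.foldl_cons, PySem.List.pyGet?_zero_cons, Option.getD_some, Int.toNat_zero]
      cases h : (PySem.List.pyGet? r0 j).getD none with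
      | some v => simpa [rowFold, h] using ih (s0.set tf (some v)) (tf + 1)
      | none => simpa [rowFold, h] using ih s0 tf

theorem inner_i1 (r0 r1 : List (Option Int)) (rest : List (List (Option Int)))
    (js : List Int) (s0 s1 s2 s3 : List (Option Int)) (tf : Nat) :
    js.foldl (fun p j =>
        match ((PySem.List.pyGet? (r0 :: r1 :: rest) (1 : Int)).getD []) |> (fun row => (PySem.List.pyGet? row j).getD none) with
        | some v => (p.1.set (1 : Int).toNat ((p.1.getD (1 : Int).toNat []).set p.2 (some v)), p.2 + 1)
        | none => p) ([s0, s1, s2, s3], tf)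
      = ([s0, (rowFold js r1 s1 tf).1, s2, s3], (rowFold js r1 s1 tf).2) := by
  induction js generalizing s1 tf with
  | nil => simp [rowFold]
  | cons j js ih =>
      simp only [List.foldl_cons, pg1, Option.getD_some, Int.toNat_one]
      cases h : (PySem.List.pyGet? r1 j).getD none with
      | some v => simpa [rowFold, h] using ih (s1.set tf (some v)) (tf + 1)
      | none => simpa [rowFold, h] using ih s1 tf

theorem inner_i2 (r0 r1 r2 : List (Option Int)) (rest : List (List (Option Int)))
    (js : List Int) (s0 s1 s2 s3 : List (Option Int)) (tf : Nat) :
    js.foldl (fun p j =>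
        match ((PySem.List.pyGet? (r0 :: r1 :: r2 :: rest) (2 : Int)).getD []) |> (fun row => (PySem.List.pyGet? row j).getD none) with
        | some v => (p.1.set (2 : Int).toNat ((p.1.getD (2 : Int).toNat []).set p.2 (some v)), p.2 + 1)
        | none => p) ([s0, s1, s2, s3], tf)
      = ([s0, s1, (rowFold js r2 s2 tf).1, s3], (rowFold js r2 s2 tf).2) := by
  induction js generalizing s2 tf with
  | nil => simp [rowFold]
  | cons j js ih =>
      simp only [List.foldl_cons, pg2, Option.getD_some, tn2]
      cases h : (PySem.List.pyGet? r2 j).getD none with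
      | some v => simpa [rowFold, h, pg2] using ih (s2.set tf (some v)) (tf + 1)
      | none => simpa [rowFold, h, pg2] using ih s2 tf

theorem inner_i3 (r0 r1 r2 r3 : List (Option Int)) (rest : List (List (Option Int)))
    (js : List Int) (s0 s1 s2 s3 : List (Option Int)) (tf : Nat) :
    js.foldl (fun p j =>
        match ((PySem.List.pyGet? (r0 :: r1 :: r2 :: r3 :: rest) (3 : Int)).getD []) |> (fun row => (PySem.List.pyGet? row j).getD none) with
        | some v => (p.1.set (3 : Int).toNat ((p.1.getD (3 : Int).toNat []).set p.2 (some v)), p.2 + 1)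
        | none => p) ([s0, s1, s2, s3], tf)
      = ([s0, s1, s2, (rowFold js r3 s3 tf).1], (rowFold js r3 s3 tf).2) := by
  induction js generalizing s3 tf with
  | nil => simp [rowFold]
  | cons j js ih =>
      simp only [List.foldl_cons, pg3, Option.getD_some, tn3]
      cases h : (PySem.List.pyGet? r3 j).getD none with
      | some v => simpa [rowFold, h, pg3] using ih (s3.set tf (some v)) (tf + 1)
      | none => simpa [rowFold, h, pg3] using ih s3 tf

theorem stack_left_decomp (r0 r1 r2 r3 : List (Option Int)) (rest : List (List (Option Int))) :
    stack_left (r0 :: r1 :: r2 :: r3 :: rest) = [gRow r0, gRow r1, gRow r2, gRow r3] := by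
  have hr : PySem.List.pyRange 0 4 1 = [0, 1, 2, 3] := by decide
  have hg0 : (rowFold [0, 1, 2, 3] r0 [none, none, none, none] 0).1 = gRow r0 := by
    simp only [gRow, hr, List.map_cons, List.map_nil]
  have hg1 : (rowFold [0, 1, 2, 3] r1 [none, none, none, none] 0).1 = gRow r1 := by
    simp only [gRow, hr, List.map_cons, List.map_nil]
  have hg2 : (rowFold [0, 1, 2, 3] r2 [none, none, none, none] 0).1 = gRow r2 := by
    simp only [gRow, hr, List.map_cons, List.map_nil]
  have hg3 : (rowFold [0, 1, 2, 3] r3 [none, none, none, none] 0).1 = gRow r3 := by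
    simp only [gRow, hr, List.map_cons, List.map_nil]
  simp only [stack_left, hr, List.map_cons, List.map_nil]
  rw [List.foldl_cons]
  rw [inner_i0]; dsimp only; rw [hg0]
  rw [List.foldl_cons]
  rw [inner_i1]; dsimp only; rw [hg1]
  rw [List.foldl_cons]
  rw [inner_i2]; dsimp only; rw [hg2]
  rw [List.foldl_cons]
  rw [inner_i3]; dsimp only; rw [hg3]
  rw [List.foldl_nil]

-- A's accumulate pass over one full row equals B's stable key-sort of its 4 cells.
theorem row_eq (a b c d : Option Int) (t : List (Option Int)) :
    gRow (a :: b :: c :: d :: t)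
      = PySem.List.sorted
          ((PySem.List.pyRange 0 4 1).map (fun j =>
            (PySem.List.pyGet? (a :: b :: c :: d :: t) j).getD none))
          (fun x => if x.isNone then (1 : Int) else 0) false := by
  have hr : PySem.List.pyRange 0 4 1 = [0, 1, 2, 3] := by decide
  rcases a with _ | va <;> rcases b with _ | vb <;> rcases c with _ | vc <;> rcases d with _ | vd <;>
    simp [gRow, rowFold, hr, PySem.List.pyGet?_zero_cons, pg1, pg2, pg3,
      PySem.List.sorted, PySem.List.insertBy]

-- ===== VERDICT (by name: the statement is the Claim_ definition above) =====
theorem stack_left_spec : Claim_equal_stack_left := by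
  intro tiles _ hpre
  obtain ⟨hlen, hrows⟩ := hpre
  match tiles, hlen with
  | r0 :: r1 :: r2 :: r3 :: rest, _ =>
    have h0 := hrows r0 (by simp)
    have h1 := hrows r1 (by simp)
    have h2 := hrows r2 (by simp)
    have h3 := hrows r3 (by simp)
    match r0, h0, r1, h1, r2, h2, r3, h3 with
    | a0 :: b0 :: c0 :: d0 :: t0, _, a1 :: b1 :: c1 :: d1 :: t1, _,
      a2 :: b2 :: c2 :: d2 :: t2, _, a3 :: b3 :: c3 :: d3 :: t3, _ =>
      show stack_left _ = stack_left_alt _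
      have hr : PySem.List.pyRange 0 4 1 = [0, 1, 2, 3] := by decide
      rw [stack_left_decomp, row_eq, row_eq, row_eq, row_eq]
      simp only [stack_left_alt, hr, List.map_cons, List.map_nil, PySem.List.pyGet?_zero_cons,
        pg1, pg2, pg3, Option.getD_some]
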